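-- pv_equiv track=rewrite | github.com/vanden/code_challenges | leetcode/longestvalidparentheses.py | getSubstrings
-- ===== SOURCE A (Python) =====
-- def getSubstrings(s):
--
--     if len(s) == 0:
--         return ['']
--     elif len(s) == 1:
--         return ['', s]
--     seen = set()
--
--     for length in range(len(s), 0, -1):
--         for start in range(len(s)):
--             if start + length > len(s):
--                 break
--             sstring = s[start:start + length]
--             if sstring in seen:
--                 continue
--             seen.add(sstring)
--             yield sstring
-- ===== SOURCE B (Python) =====
-- def getSubstrings(s):
--
--     if len(s) == 0:
--         return ['']
--     elif len(s) == 1: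
--         return ['', s]
--     seen = set()
--     subs = []
--     for start in range(len(s)):
--         for end in range(start + 1, len(s) + 1):
--             t = s[start:end]
--             if t not in seen:
--                 seen.add(t)
--                 subs.append(t)
--     yield from sorted(subs, key=lambda t: -len(t))
-- ===== Notes on version B (the rewrite author's own statement) =====
-- stated objective: alternative
-- what changed: A emits distinct substrings directly in length-descending order via a length-major double loop with a break; B first collects all distinct substrings in a start-major pass and then stable-sorts them by decreasing length before yielding.
import Mathlib
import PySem

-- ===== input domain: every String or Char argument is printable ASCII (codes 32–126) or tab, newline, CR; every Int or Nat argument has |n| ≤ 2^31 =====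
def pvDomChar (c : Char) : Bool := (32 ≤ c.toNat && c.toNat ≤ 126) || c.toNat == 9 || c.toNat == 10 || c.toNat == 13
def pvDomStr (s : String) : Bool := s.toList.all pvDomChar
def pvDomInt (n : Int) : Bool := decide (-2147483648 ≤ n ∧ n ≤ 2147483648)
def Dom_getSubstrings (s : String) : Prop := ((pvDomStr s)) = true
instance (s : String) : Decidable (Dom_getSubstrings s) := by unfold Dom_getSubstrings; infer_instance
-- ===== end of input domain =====

-- B collects all distinct substrings in one start-major pass and then stable-sorts them by
-- decreasing length, instead of A's direct length-descending emission with a break ("alternative").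
-- For len(s) <= 1 both Pythons are generators that hit a plain `return`, so they yield nothing.


-- ===== PORT A =====
-- the inner `for start in range(len(s))` loop with its break / continue, recursing over the
-- list of start values; state = (seen, yielded-so-far)
def innerA (s : String) (length : Int) :
    List Int → PySem.Set String × List String → PySem.Set String × List String
  | [], st => st
  | start :: rest, st =>
    if start + length > PySem.Str.len s then st          -- break
    else
      let sstring := PySem.Str.slice s (some start) (some (start + length))
      if PySem.Set.contains st.1 sstring then innerA s length rest st   -- continue
      else innerA s length rest (PySem.Set.add st.1 sstring, st.2 ++ [sstring])

def getSubstrings (s : String) : List String :=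
  if PySem.Str.len s == 0 then []         -- `return ['']` inside a generator: yields nothing
  else if PySem.Str.len s == 1 then []    -- `return ['', s]` inside a generator: yields nothing
  else
    ((PySem.List.pyRange (PySem.Str.len s) 0 (-1)).foldl
      (fun st length => innerA s length (PySem.List.pyRange 0 (PySem.Str.len s)) st)
      (PySem.Set.empty, [])).2

-- ===== PORT B =====
def getSubstrings_alt (s : String) : List String :=
  if PySem.Str.len s == 0 then []
  else if PySem.Str.len s == 1 then []
  else
    let subs := ((PySem.List.pyRange 0 (PySem.Str.len s)).foldl
      (fun st start =>
        (PySem.List.pyRange (start + 1) (PySem.Str.len s + 1)).foldl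
          (fun (st : PySem.Set String × List String) e =>
            let t := PySem.Str.slice s (some start) (some e)
            if PySem.Set.contains st.1 t then st
            else (PySem.Set.add st.1 t, st.2 ++ [t]))
          st)
      (PySem.Set.empty, [])).2
    PySem.List.sorted subs (fun t => -(PySem.Str.len t)) false

-- ===== PRECONDITION & SPEC =====
def Spec_getSubstrings (s : String) (out : List String) : Prop := out = getSubstrings_alt s
instance (s : String) (out : List String) : Decidable (Spec_getSubstrings s out) := by unfold Spec_getSubstrings; infer_instance

-- ===== CLAIM (what is proved, stated in full; the proofs are below) =====
def Claim_equal_getSubstrings : Prop := ∀ (s : String), Dom_getSubstrings s → Spec_getSubstrings s (getSubstrings s)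

-- ===== LEMMAS AND PROOFS =====

-- the window s[i:i+ℓ]; the canonical answer lists, for each length ℓ = n..1, the distinct
-- length-ℓ windows in order of first (= smallest) start
def win (s : String) (i ℓ : Nat) : String := PySem.Str.slice s (some (i : Int)) (some ((i : Int) + (ℓ : Int)))
def wins (s : String) (ℓ : Nat) : List String :=
  (List.range (s.toList.length - ℓ + 1)).map (fun i => win s i ℓ)
def lens (n : Nat) : List Nat := (List.range n).map (fun k => n - k)
def canon (s : String) : List String :=
  (lens s.toList.length).flatMap (fun ℓ => PySem.Set.ofList (wins s ℓ))

-- the common loop body of both collectors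
def step (st : PySem.Set String × List String) (t : String) : PySem.Set String × List String :=
  if PySem.Set.contains st.1 t then st else (PySem.Set.add st.1 t, st.2 ++ [t])

theorem win_toList (s : String) (i ℓ : Nat) :
    (win s i ℓ).toList = (s.toList.drop i).take ℓ := by
  unfold win
  rw [PySem.Str.toList_slice]
  rw [show ((i:Int)+(ℓ:Int)) = (((i+ℓ:Nat)):Int) by push_cast; ring]
  unfold PySem.Chars.slice
  rw [PySem.List.slice_natCast]
  simp

theorem win_length (s : String) (i ℓ : Nat) (h : i + ℓ ≤ s.toList.length) :
    (win s i ℓ).toList.length = ℓ := by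
  rw [win_toList, List.length_take, List.length_drop]; omega

theorem mem_lens (n ℓ : Nat) : ℓ ∈ lens n ↔ 1 ≤ ℓ ∧ ℓ ≤ n := by
  unfold lens
  rw [List.mem_map]
  constructor
  · rintro ⟨k, hk, rfl⟩
    rw [List.mem_range] at hk
    omega
  · rintro ⟨h1, h2⟩
    exact ⟨n - ℓ, List.mem_range.mpr (by omega), by omega⟩

theorem pairwise_ne_lens (n : Nat) : (lens n).Pairwise (· ≠ ·) := by
  unfold lens
  rw [List.pairwise_map]
  apply List.pairwise_lt_range.imp_of_mem
  intro a b ha hb hab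
  simp only [List.mem_range] at ha hb
  omega

theorem flatMap_singleton_map {α β : Type} (l : List α) (f : α → List β) (g : α → β)
    (h : ∀ a ∈ l, f a = [g a]) : l.flatMap f = l.map g := by
  rw [List.flatMap_congr h]
  clear h
  induction l with
  | nil => rfl
  | cons a l ih => simp only [List.flatMap_cons, List.map_cons, List.singleton_append, ih]

-- ---- A side ----

theorem innerA_cons_eq (s : String) (ℓ j : Int) (js : List Int)
    (st : PySem.Set String × List String) :
    innerA s ℓ (j :: js) st
      = if j + ℓ > PySem.Str.len s then st
        else
          (fun t => if PySem.Set.contains st.1 t then innerA s ℓ js st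
                    else innerA s ℓ js (PySem.Set.add st.1 t, st.2 ++ [t]))
            (PySem.Str.slice s (some j) (some (j + ℓ))) := rfl

theorem innerA_cons (s : String) (ℓ j : Int) (js : List Int)
    (st : PySem.Set String × List String) (h : ¬ (j + ℓ > PySem.Str.len s)) :
    innerA s ℓ (j :: js) st
      = innerA s ℓ js (step st (PySem.Str.slice s (some j) (some (j + ℓ)))) := by
  rw [innerA_cons_eq, if_neg h]
  beta_reduce
  unfold step
  by_cases hc : PySem.Set.contains st.1 (PySem.Str.slice s (some j) (some (j + ℓ))) = true
  · rw [if_pos hc, if_pos hc]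
  · rw [if_neg hc, if_neg hc]

theorem innerA_no_break (s : String) (ℓ : Int) (is : List Nat) (rest : List Int)
    (st : PySem.Set String × List String)
    (h : ∀ i ∈ is, (i : Int) + ℓ ≤ PySem.Str.len s) :
    innerA s ℓ (List.map (fun (i : Nat) => (i : Int)) is ++ rest) st
      = innerA s ℓ rest
          (List.foldl (fun st (i : Nat) => step st (PySem.Str.slice s (some (i : Int)) (some ((i : Int) + ℓ)))) st is) := by
  induction is generalizing st with
  | nil => simp
  | cons i is ih =>
    have hi : ¬ ((i:Int) + ℓ > PySem.Str.len s) := by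
      have := h i (by simp); omega
    have h' : ∀ j ∈ is, (j:Int) + ℓ ≤ PySem.Str.len s := fun j hj => h j (by simp [hj])
    rw [List.map_cons, List.cons_append, innerA_cons s ℓ _ _ st hi, List.foldl_cons, ih _ h']

theorem innerA_break (s : String) (ℓ j : Int) (js : List Int)
    (h : j + ℓ > PySem.Str.len s) (st : PySem.Set String × List String) :
    innerA s ℓ (j :: js) st = st := by
  rw [innerA_cons_eq, if_pos h]

theorem innerA_range (s : String) (ℓ : Nat) (hℓ1 : 1 ≤ ℓ) (hℓn : ℓ ≤ s.toList.length)
    (st : PySem.Set String × List String) :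
    innerA s (ℓ : Int) (PySem.List.pyRange 0 (PySem.Str.len s)) st
      = (wins s ℓ).foldl step st := by
  set n := s.toList.length with hn
  have hlen : PySem.Str.len s = (n : Int) := PySem.Str.len_eq s
  rw [hlen, PySem.List.pyRange_zero_natCast]
  have hsplit : List.range n = List.range (n - ℓ + 1) ++ (List.range (ℓ - 1)).map (fun x => (n - ℓ + 1) + x) := by
    rw [← List.range_add]; congr 1; omega
  rw [hsplit, List.map_append]
  rw [innerA_no_break s (ℓ:Int) _ _ st (by
    intro i hi; simp only [List.mem_range] at hi; rw [hlen]; omega)]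
  have hrest : ∀ st2, innerA s (ℓ:Int)
      (List.map (fun (i : Nat) => (i : Int)) ((List.range (ℓ - 1)).map (fun x => (n - ℓ + 1) + x))) st2 = st2 := by
    intro st2
    rcases hr : List.range (ℓ - 1) with _ | ⟨a, as⟩
    · rfl
    · rw [List.map_cons, List.map_cons]
      apply innerA_break
      rw [hlen]; push_cast; omega
  rw [hrest]
  unfold wins
  rw [List.foldl_map, ← hn]
  rfl

-- running `step` over fresh-length strings appends their ordered dedup to both components
theorem foldl_step_fresh (ℓ : Nat) (ws : List String) (hw : ∀ w ∈ ws, w.toList.length = ℓ)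
    (seen out : List String) (hseen : ∀ t ∈ seen, t.toList.length ≠ ℓ) :
    ∀ d : List String,
    ws.foldl step (seen ++ d, out ++ d)
      = (seen ++ ws.foldl PySem.Set.add d, out ++ ws.foldl PySem.Set.add d) := by
  induction ws with
  | nil => intro d; simp
  | cons w ws ih =>
    intro d
    have hw' : ∀ x ∈ ws, x.toList.length = ℓ := fun x hx => hw x (by simp [hx])
    have hwlen : w.toList.length = ℓ := hw w (by simp)
    have hnotseen : w ∉ seen := fun hmem => hseen w hmem hwlen
    by_cases hd : w ∈ d
    · have h1 : step (seen ++ d, out ++ d) w = (seen ++ d, out ++ d) := by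
        simp [step, PySem.Set.contains, List.contains_eq_mem, hd]
      have h2 : PySem.Set.add d w = d := by
        simp [PySem.Set.add, PySem.Set.contains, List.contains_eq_mem, hd]
      rw [List.foldl_cons, h1, List.foldl_cons, h2, ih hw' d]
    · have h1 : step (seen ++ d, out ++ d) w = (seen ++ (d ++ [w]), out ++ (d ++ [w])) := by
        simp [step, PySem.Set.contains, PySem.Set.add, List.contains_eq_mem, hd, hnotseen]
      have h2 : PySem.Set.add d w = d ++ [w] := by
        simp [PySem.Set.add, PySem.Set.contains, List.contains_eq_mem, hd]
      rw [List.foldl_cons, h1, List.foldl_cons, h2, ih hw' (d ++ [w])]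

theorem ofList_lengths (s : String) (ℓ : Nat) (hℓn : ℓ ≤ s.toList.length) :
    ∀ t ∈ PySem.Set.ofList (wins s ℓ), t.toList.length = ℓ := by
  intro t ht
  rw [PySem.Set.mem_ofList] at ht
  unfold wins at ht
  simp only [List.mem_map, List.mem_range] at ht
  obtain ⟨i, hi, rfl⟩ := ht
  exact win_length s i ℓ (by omega)

theorem outerA (s : String) (ls : List Nat)
    (hls : ∀ ℓ ∈ ls, 1 ≤ ℓ ∧ ℓ ≤ s.toList.length) (hnd : ls.Pairwise (· ≠ ·))
    (seen out : List String) (hseen : ∀ t ∈ seen, ∀ ℓ ∈ ls, t.toList.length ≠ ℓ) :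
    (List.map (fun (ℓ : Nat) => (ℓ : Int)) ls).foldl
        (fun st length => innerA s length (PySem.List.pyRange 0 (PySem.Str.len s)) st) (seen, out)
      = (seen ++ ls.flatMap (fun ℓ => PySem.Set.ofList (wins s ℓ)),
         out ++ ls.flatMap (fun ℓ => PySem.Set.ofList (wins s ℓ))) := by
  induction ls generalizing seen out with
  | nil => simp
  | cons ℓ ls ih =>
    obtain ⟨h1, h2⟩ := hls ℓ (by simp)
    have hrow := ofList_lengths s ℓ h2
    simp only [List.map_cons, List.foldl_cons]
    rw [innerA_range s ℓ h1 h2]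
    have hfold : (wins s ℓ).foldl step (seen, out)
        = (seen ++ PySem.Set.ofList (wins s ℓ), out ++ PySem.Set.ofList (wins s ℓ)) := by
      have := foldl_step_fresh ℓ (wins s ℓ)
        (by intro w hw; unfold wins at hw; simp only [List.mem_map, List.mem_range] at hw
            obtain ⟨i, hi, rfl⟩ := hw; exact win_length s i ℓ (by omega))
        seen out (fun t ht => hseen t ht ℓ (by simp)) []
      rw [List.append_nil, List.append_nil] at this
      rw [this, PySem.Set.ofList_eq_foldl]
    rw [hfold]
    rw [ih (fun x hx => hls x (by simp [hx])) (List.Pairwise.sublist (by simp) hnd)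
        (seen ++ PySem.Set.ofList (wins s ℓ)) (out ++ PySem.Set.ofList (wins s ℓ)) ?_]
    · simp
    · intro t ht ℓ' hℓ'
      rcases List.mem_append.mp ht with hts | htr
      · exact hseen t hts ℓ' (by simp [hℓ'])
      · rw [hrow t htr]
        rcases hnd with _ | ⟨hne, _⟩
        exact hne ℓ' hℓ'

theorem portA_eq_canon (s : String) (h2 : 2 ≤ s.toList.length) :
    getSubstrings s = canon s := by
  set n := s.toList.length with hn
  have hlen : PySem.Str.len s = (n : Int) := PySem.Str.len_eq s
  unfold getSubstrings
  rw [hlen]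
  rw [if_neg (by simp only [beq_iff_eq]; omega), if_neg (by simp only [beq_iff_eq]; omega)]
  have hrange : PySem.List.pyRange (n : Int) 0 (-1) = List.map (fun (ℓ : Nat) => (ℓ : Int)) (lens n) := by
    rw [PySem.List.pyRange_neg_one]
    unfold lens
    rw [List.map_map]
    have he : ((n:Int) - (0:Int)).toNat = n := by omega
    rw [he]
    apply List.map_congr_left
    intro k hk
    simp only [List.mem_range] at hk
    simp only [Function.comp_apply]
    omega
  rw [hrange]
  rw [show ((PySem.Set.empty : PySem.Set String), ([] : List String)) = (([] : List String), ([] : List String)) from rfl]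
  have ho := outerA s (lens n) (fun ℓ hℓ => by rw [← hn]; exact (mem_lens n ℓ).mp hℓ)
      (pairwise_ne_lens n) [] [] (by simp)
  rw [hlen] at ho
  rw [ho]
  unfold canon
  rw [← hn]
  simp

-- ---- B side ----

theorem foldl_step_diag (ws : List String) : ∀ d : List String,
    ws.foldl step (d, d) = (ws.foldl PySem.Set.add d, ws.foldl PySem.Set.add d) := by
  induction ws with
  | nil => intro d; simp
  | cons w ws ih =>
    intro d
    by_cases hd : w ∈ d
    · have h1 : step (d, d) w = (d, d) := by
        simp [step, PySem.Set.contains, List.contains_eq_mem, hd]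
      have h2 : PySem.Set.add d w = d := by
        simp [PySem.Set.add, PySem.Set.contains, List.contains_eq_mem, hd]
      rw [List.foldl_cons, h1, List.foldl_cons, h2, ih d]
    · have h1 : step (d, d) w = (d ++ [w], d ++ [w]) := by
        simp [step, PySem.Set.contains, PySem.Set.add, List.contains_eq_mem, hd]
      have h2 : PySem.Set.add d w = d ++ [w] := by
        simp [PySem.Set.add, PySem.Set.contains, List.contains_eq_mem, hd]
      rw [List.foldl_cons, h1, List.foldl_cons, h2, ih (d ++ [w])]

def Lfull (s : String) : List String :=
  (List.range s.toList.length).flatMap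
    (fun i => (List.range (s.toList.length - i)).map (fun k => win s i (k + 1)))

theorem collectB_eq (s : String) :
    (((PySem.List.pyRange 0 (PySem.Str.len s)).foldl
      (fun st start =>
        (PySem.List.pyRange (start + 1) (PySem.Str.len s + 1)).foldl
          (fun (st : PySem.Set String × List String) e =>
            let t := PySem.Str.slice s (some start) (some e)
            if PySem.Set.contains st.1 t then st
            else (PySem.Set.add st.1 t, st.2 ++ [t]))
          st)
      (PySem.Set.empty, [])).2)
    = PySem.Set.ofList (Lfull s) := by
  set n := s.toList.length with hn
  have hlen : PySem.Str.len s = (n : Int) := PySem.Str.len_eq s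
  rw [hlen, PySem.List.pyRange_zero_natCast]
  have hbody : ∀ (i : Nat) (st : PySem.Set String × List String), i < n →
      (PySem.List.pyRange ((i:Int) + 1) ((n:Int) + 1)).foldl
          (fun (st : PySem.Set String × List String) e =>
            let t := PySem.Str.slice s (some (i:Int)) (some e)
            if PySem.Set.contains st.1 t then st
            else (PySem.Set.add st.1 t, st.2 ++ [t]))
          st
        = ((List.range (n - i)).map (fun k => win s i (k + 1))).foldl step st := by
    intro i st _
    rw [PySem.List.pyRange_one]
    have he : (((n:Int) + 1) - ((i:Int) + 1)).toNat = n - i := by omega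
    rw [he, List.foldl_map, List.foldl_map]
    apply PySem.List.foldl_congr_mem
    intro acc k _
    unfold step win
    have he2 : ((i:Int) + 1 + (k:Int)) = ((i:Int) + ((k:Nat) + 1 : Nat)) := by push_cast; ring
    rw [he2]
  rw [List.foldl_map]
  have hcong := PySem.List.foldl_congr_mem (l := List.range n)
    (f := fun st (i : Nat) =>
      (PySem.List.pyRange ((i:Int) + 1) ((n:Int) + 1)).foldl
          (fun (st : PySem.Set String × List String) e =>
            let t := PySem.Str.slice s (some (i:Int)) (some e)
            if PySem.Set.contains st.1 t then st
            else (PySem.Set.add st.1 t, st.2 ++ [t]))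
          st)
    (g := fun st (i : Nat) => ((List.range (n - i)).map (fun k => win s i (k + 1))).foldl step st)
    (init := ((PySem.Set.empty : PySem.Set String), ([] : List String)))
    (by intro acc i hi; exact hbody i acc (List.mem_range.mp hi))
  rw [hcong]
  rw [← List.foldl_flatMap]
  have hL : (List.range n).flatMap (fun i => (List.range (n - i)).map (fun k => win s i (k + 1))) = Lfull s := by
    unfold Lfull; rw [← hn]
  rw [hL]
  rw [show ((PySem.Set.empty : PySem.Set String), ([] : List String)) = (([] : List String), ([] : List String)) from rfl]
  rw [foldl_step_diag (Lfull s) [], PySem.Set.ofList_eq_foldl]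

-- insertBy walks past a block it does not insert before
theorem insertBy_pass {α : Type} (before : α → α → Bool) (x : α) (A B : List α)
    (hA : ∀ a ∈ A, before x a = false) :
    PySem.List.insertBy before x (A ++ B) = A ++ PySem.List.insertBy before x B := by
  induction A with
  | nil => simp
  | cons a A ih =>
    have ha : before x a = false := hA a (by simp)
    simp only [List.cons_append, PySem.List.insertBy, ha, Bool.false_eq_true, if_false]
    rw [ih (fun a ha => hA a (by simp [ha]))]

theorem insertBy_head {α : Type} (before : α → α → Bool) (x : α) (B : List α)
    (hB : ∀ b ∈ B, before x b = true) :
    PySem.List.insertBy before x B = x :: B := by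
  cases B with
  | nil => rfl
  | cons b B => simp [PySem.List.insertBy, hB b (by simp)]

-- stable insertion into a key-grouped list lands at the end of the matching group
theorem insertBy_grouped (key : String → Int) (x : String) (ks : List Int)
    (hsort : ks.Pairwise (· < ·)) (hx : key x ∈ ks) (P : List String) :
    PySem.List.insertBy (fun a b => decide (key a < key b)) x
        (ks.flatMap (fun v => P.filter (fun t => key t == v)))
      = ks.flatMap (fun v => (P ++ [x]).filter (fun t => key t == v)) := by
  induction ks with
  | nil => simp at hx
  | cons v ks ih =>
    rcases hsort with _ | ⟨hlt, hsort'⟩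
    simp only [List.flatMap_cons]
    by_cases hv : key x = v
    · have hfilter : ∀ v' ∈ ks, (P ++ [x]).filter (fun t => key t == v') = P.filter (fun t => key t == v') := by
        intro v' hv'
        have hne : (key x == v') = false := by
          have := hlt v' hv'
          simp only [beq_eq_false_iff_ne, ne_eq]
          omega
        simp [List.filter_append, hne]
      have hgoal2 : (P ++ [x]).filter (fun t => key t == v) = P.filter (fun t => key t == v) ++ [x] := by
        simp [List.filter_append, hv]
      rw [insertBy_pass _ x _ _ (by
        intro a ha
        simp only [List.mem_filter, beq_iff_eq] at ha
        simp [hv, ha.2])]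
      rw [insertBy_head _ x _ (by
        intro b hb
        simp only [List.mem_flatMap, List.mem_filter, beq_iff_eq] at hb
        obtain ⟨v', hv', _, hkb⟩ := hb
        simp only [decide_eq_true_eq, hkb, hv]
        exact hlt v' hv')]
      rw [hgoal2, List.flatMap_congr hfilter]
      simp
    · have hxks : key x ∈ ks := by
        rcases List.mem_cons.mp hx with hcs | hcs
        · exact absurd hcs hv
        · exact hcs
      have hvlt : v < key x := hlt _ hxks
      rw [insertBy_pass _ x _ _ (by
        intro a ha
        simp only [List.mem_filter, beq_iff_eq] at ha
        simp only [decide_eq_false_iff_not, not_lt, ha.2]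
        omega)]
      rw [ih hsort' hxks]
      have hsame : (P ++ [x]).filter (fun t => key t == v) = P.filter (fun t => key t == v) := by
        have hne : (key x == v) = false := by simp only [beq_eq_false_iff_ne, ne_eq]; exact hv
        simp [List.filter_append, hne]
      rw [hsame]

-- Python's stable sort groups a list by its (finitely many) key values
theorem sorted_eq_grouped (key : String → Int) (L : List String) (ks : List Int)
    (hsort : ks.Pairwise (· < ·)) (hL : ∀ x ∈ L, key x ∈ ks) :
    PySem.List.sorted L key false = ks.flatMap (fun v => L.filter (fun t => key t == v)) := by
  rw [PySem.List.sorted_eq_foldl_insertBy]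
  induction L using List.reverseRecOn with
  | nil => simp
  | append_singleton L x ih =>
    rw [List.foldl_append, List.foldl_cons, List.foldl_nil]
    rw [ih (fun y hy => hL y (by simp [hy]))]
    exact insertBy_grouped key x ks hsort (hL x (by simp)) L

theorem ofList_filter (p : String → Bool) (xs : List String) :
    (PySem.Set.ofList xs).filter p = PySem.Set.ofList (xs.filter p) := by
  rw [PySem.Set.ofList_eq_foldl, PySem.Set.ofList_eq_foldl]
  suffices h : ∀ (acc : List String), (xs.foldl PySem.Set.add acc).filter p
      = (xs.filter p).foldl PySem.Set.add (acc.filter p) by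
    simpa using h []
  induction xs with
  | nil => intro acc; simp
  | cons x xs ih =>
    intro acc
    by_cases hp : p x = true
    · by_cases hc : x ∈ acc
      · have h1 : PySem.Set.add acc x = acc := by
          simp [PySem.Set.add, PySem.Set.contains, List.contains_eq_mem, hc]
        have h2 : PySem.Set.add (acc.filter p) x = acc.filter p := by
          simp [PySem.Set.add, PySem.Set.contains, List.contains_eq_mem, List.mem_filter, hc, hp]
        rw [List.foldl_cons, h1, List.filter_cons_of_pos hp, List.foldl_cons, h2, ih]
      · have h1 : PySem.Set.add acc x = acc ++ [x] := by
          simp [PySem.Set.add, PySem.Set.contains, List.contains_eq_mem, hc]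
        have h2 : PySem.Set.add (acc.filter p) x = acc.filter p ++ [x] := by
          have : x ∉ acc.filter p := fun hm => hc (List.mem_filter.mp hm).1
          simp [PySem.Set.add, PySem.Set.contains, List.contains_eq_mem, this]
        have h3 : (acc ++ [x]).filter p = acc.filter p ++ [x] := by
          simp [List.filter_append, hp]
        rw [List.foldl_cons, h1, List.filter_cons_of_pos hp, List.foldl_cons, h2, ih, h3]
    · have hpf : p x = false := by simpa using hp
      by_cases hc : x ∈ acc
      · have h1 : PySem.Set.add acc x = acc := by
          simp [PySem.Set.add, PySem.Set.contains, List.contains_eq_mem, hc]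
        rw [List.foldl_cons, h1, List.filter_cons_of_neg (by simp [hpf]), ih]
      · have h1 : PySem.Set.add acc x = acc ++ [x] := by
          simp [PySem.Set.add, PySem.Set.contains, List.contains_eq_mem, hc]
        have h3 : (acc ++ [x]).filter p = acc.filter p := by
          simp [List.filter_append, hpf]
        rw [List.foldl_cons, h1, List.filter_cons_of_neg (by simp [hpf]), ih, h3]

theorem range_filter_eq (m j : Nat) :
    (List.range m).filter (fun k => decide (k = j)) = if j < m then [j] else [] := by
  induction m with
  | zero => simp
  | succ m ih =>
    rw [List.range_succ, List.filter_append, ih]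
    by_cases h : m = j
    · subst h
      rw [if_neg (by omega), if_pos (by omega)]
      simp
    · have hm : List.filter (fun k => decide (k = j)) [m] = [] := by simp [h]
      rw [hm, List.append_nil]
      by_cases hj : j < m
      · rw [if_pos hj, if_pos (by omega)]
      · rw [if_neg hj, if_neg (by omega)]

theorem filter_Lfull (s : String) (ℓ : Nat) (h1 : 1 ≤ ℓ) (h2 : ℓ ≤ s.toList.length) :
    (Lfull s).filter (fun t => -(PySem.Str.len t) == -(ℓ:Int)) = wins s ℓ := by
  set n := s.toList.length with hn
  unfold Lfull
  rw [← hn, List.filter_flatMap]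
  have hinner : ∀ i ∈ List.range n,
      ((List.range (n - i)).map (fun k => win s i (k + 1))).filter (fun t => -(PySem.Str.len t) == -(ℓ:Int))
        = if ℓ - 1 < n - i then [win s i ℓ] else [] := by
    intro i hi
    rw [List.filter_map]
    have hpred : ∀ k ∈ List.range (n - i),
        ((fun t => -(PySem.Str.len t) == -(ℓ:Int)) ∘ (fun k => win s i (k + 1))) k
          = decide (k = ℓ - 1) := by
      intro k hk
      simp only [List.mem_range] at hk
      simp only [Function.comp_apply, PySem.Str.len_eq]
      rw [win_length s i (k+1) (by omega)]
      by_cases hkℓ : k = ℓ - 1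
      · subst hkℓ
        rw [decide_eq_true (by rfl)]
        have he : ((ℓ - 1 + 1 : Nat) : Int) = (ℓ : Int) := by omega
        rw [he]
        simp
      · rw [decide_eq_false hkℓ]
        simp only [beq_eq_false_iff_ne, ne_eq, neg_inj]
        omega
    rw [List.filter_congr hpred, range_filter_eq]
    by_cases hcase : ℓ - 1 < n - i
    · rw [if_pos hcase, if_pos hcase]
      simp only [List.map_cons, List.map_nil]
      congr 2
      omega
    · rw [if_neg hcase, if_neg hcase, List.map_nil]
  rw [List.flatMap_congr hinner]
  have hsplit : List.range n = List.range (n - ℓ + 1) ++ (List.range (ℓ - 1)).map (fun x => (n - ℓ + 1) + x) := by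
    rw [← List.range_add]; congr 1; omega
  rw [hsplit, List.flatMap_append]
  have hfirst : (List.range (n - ℓ + 1)).flatMap (fun i => if ℓ - 1 < n - i then [win s i ℓ] else [])
      = (List.range (n - ℓ + 1)).map (fun i => win s i ℓ) := by
    apply flatMap_singleton_map
    intro i hi
    simp only [List.mem_range] at hi
    rw [if_pos (by omega)]
  have hsecond : ((List.range (ℓ - 1)).map (fun x => (n - ℓ + 1) + x)).flatMap
      (fun i => if ℓ - 1 < n - i then [win s i ℓ] else []) = [] := by
    apply List.flatMap_eq_nil_iff.mpr
    intro x hx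
    simp only [List.mem_map, List.mem_range] at hx
    obtain ⟨k, hk, rfl⟩ := hx
    rw [if_neg (by omega)]
  rw [hfirst, hsecond, List.append_nil]
  unfold wins
  rw [← hn]

theorem mem_Lfull_key (s : String) (x : String) (hx : x ∈ Lfull s) :
    -(PySem.Str.len x) ∈ List.map (fun (ℓ : Nat) => -(ℓ:Int)) (lens s.toList.length) := by
  unfold Lfull at hx
  simp only [List.mem_flatMap, List.mem_map, List.mem_range] at hx
  obtain ⟨i, hi, k, hk, rfl⟩ := hx
  rw [List.mem_map]
  refine ⟨k + 1, (mem_lens _ _).mpr ⟨by omega, by omega⟩, ?_⟩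
  rw [PySem.Str.len_eq, win_length s i (k+1) (by omega)]

theorem ks_sorted (n : Nat) : (List.map (fun (ℓ : Nat) => -(ℓ:Int)) (lens n)).Pairwise (· < ·) := by
  unfold lens
  rw [List.map_map, List.pairwise_map]
  apply List.pairwise_lt_range.imp_of_mem
  intro a b ha hb hab
  simp only [List.mem_range] at ha hb
  simp only [Function.comp_apply]
  omega

theorem portB_eq_canon (s : String) (h2 : 2 ≤ s.toList.length) :
    getSubstrings_alt s = canon s := by
  set n := s.toList.length with hn
  have hlen : PySem.Str.len s = (n : Int) := PySem.Str.len_eq s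
  unfold getSubstrings_alt
  rw [if_neg (by rw [hlen]; simp only [beq_iff_eq]; omega),
      if_neg (by rw [hlen]; simp only [beq_iff_eq]; omega)]
  rw [collectB_eq s]
  rw [sorted_eq_grouped (fun t => -(PySem.Str.len t)) (PySem.Set.ofList (Lfull s))
      (List.map (fun (ℓ : Nat) => -(ℓ:Int)) (lens n)) (ks_sorted n)
      (by
        intro x hx
        rw [PySem.Set.mem_ofList] at hx
        rw [hn]
        exact mem_Lfull_key s x hx)]
  rw [List.flatMap_map]
  unfold canon
  rw [← hn]
  apply List.flatMap_congr
  intro ℓ hℓ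
  obtain ⟨hl1, hl2⟩ := (mem_lens n ℓ).mp hℓ
  rw [ofList_filter, filter_Lfull s ℓ hl1 (by omega)]

-- ===== VERDICT (by name: the statement is the Claim_ definition above) =====
theorem getSubstrings_spec : Claim_equal_getSubstrings := by
  intro s _
  unfold Spec_getSubstrings
  by_cases h2 : 2 ≤ s.toList.length
  · rw [portA_eq_canon s h2, portB_eq_canon s h2]
  · have h0 : s.toList.length = 0 ∨ s.toList.length = 1 := by omega
    unfold getSubstrings getSubstrings_alt
    rcases h0 with h0 | h0
    · rw [if_pos (show (PySem.Str.len s == 0) = true by rw [PySem.Str.len_eq, h0]; decide),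
          if_pos (show (PySem.Str.len s == 0) = true by rw [PySem.Str.len_eq, h0]; decide)]
    · rw [if_neg (show ¬ (PySem.Str.len s == 0) = true by rw [PySem.Str.len_eq, h0]; decide),
          if_neg (show ¬ (PySem.Str.len s == 0) = true by rw [PySem.Str.len_eq, h0]; decide),
          if_pos (show (PySem.Str.len s == 1) = true by rw [PySem.Str.len_eq, h0]; decide),
          if_pos (show (PySem.Str.len s == 1) = true by rw [PySem.Str.len_eq, h0]; decide)]
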